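-- pv_equiv track=rewrite | github.com/vishaltanwar96/DSA | problems/arrays/is_element_present_in_each_segment.py | is_present_in_each_segment
-- ===== SOURCE A (Python) =====
-- def is_present_in_each_segment(array: list[int], element: int, segment_size: int) -> bool:
--
--     i = 0
--     j = segment_size - 1
--     is_present = False
--     length_of_array = len(array)
--     end_index = length_of_array - 1
--
--     while i < length_of_array:
--
--         if array[i] == element:
--             is_present = True
--             i = j + 1
--             potential_j = j + segment_size
--             j = potential_j if potential_j < end_index else end_index
--         else:
--             if i < j:
--                 i += 1
--             else:
--                 is_present = False
--                 break
--     return is_present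
-- ===== SOURCE B (Python) =====
-- def is_present_in_each_segment(array: list[int], element: int, segment_size: int) -> bool:
--     if not array:
--         return False
--     return all(element in array[start:start + segment_size]
--                for start in range(0, len(array), segment_size))
-- ===== Notes on version B (the rewrite author's own statement) =====
-- stated objective: simpler
-- what changed: Replaces A's single-pass pointer-jumping loop over mutable indices i/j with an empty-array guard plus a direct all() over segment starts range(0, len, segment_size) testing membership in each slice.
-- outside the precondition, e.g. on is_present_in_each_segment([1], 0, 0): A returns False, B raises ValueError; on is_present_in_each_segment([1], 0, -1): A returns False, B returns True
import Mathlib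
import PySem

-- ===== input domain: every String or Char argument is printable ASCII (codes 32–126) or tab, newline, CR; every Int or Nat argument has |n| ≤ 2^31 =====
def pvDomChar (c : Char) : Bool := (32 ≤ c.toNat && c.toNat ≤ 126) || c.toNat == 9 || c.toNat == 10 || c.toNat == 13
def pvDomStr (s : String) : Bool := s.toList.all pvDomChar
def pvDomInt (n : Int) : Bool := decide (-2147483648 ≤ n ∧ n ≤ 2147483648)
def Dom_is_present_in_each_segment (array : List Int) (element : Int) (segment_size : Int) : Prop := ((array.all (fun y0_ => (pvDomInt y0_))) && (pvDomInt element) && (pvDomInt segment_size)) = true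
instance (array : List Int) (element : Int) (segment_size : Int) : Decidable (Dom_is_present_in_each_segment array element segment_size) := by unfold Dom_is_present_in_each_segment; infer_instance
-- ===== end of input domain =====

-- B replaces A's pointer-jumping while-loop by a guard for the empty array plus a
-- direct "every segment slice contains the element" check over range(0, len, size): simpler, same cost.


-- ===== PORT A =====
-- A's while-loop, transcribed with explicit fuel; `array.length + 1` iterations suffice
-- whenever the Python loop terminates, since under Pre_ the index i strictly increases.
def pvLoopA (array : List Int) (element : Int) (ss : Int) : Nat → Int → Int → Bool → Bool
  | 0, _, _, isp => isp
  | fuel+1, i, j, isp =>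
    if i < (array.length : Int) then
      match PySem.List.pyGet? array i with
      | none => false   -- IndexError; unreachable, since 0 ≤ i < len throughout the loop
      | some v =>
        if v = element then
          let potential_j := j + ss
          pvLoopA array element ss fuel (j + 1)
            (if potential_j < (array.length : Int) - 1 then potential_j else (array.length : Int) - 1)
            true
        else
          if i < j then pvLoopA array element ss fuel (i + 1) j isp
          else false
    else isp

def is_present_in_each_segment (array : List Int) (element : Int) (segment_size : Int) : Bool :=
  pvLoopA array element segment_size (array.length + 1) 0 (segment_size - 1) false

-- ===== PORT B =====
def is_present_in_each_segment_alt (array : List Int) (element : Int) (segment_size : Int) : Bool :=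
  if array = [] then false
  else (PySem.List.pyRange 0 (array.length : Int) segment_size).all
    (fun start => decide (element ∈ PySem.List.slice array (some start) (some (start + segment_size))))

-- ===== PRECONDITION & SPEC =====
-- Pre_ excludes segment_size ≤ 0, where Python A either loops forever (when array[0] == element)
-- or returns an accidental False from its degenerate pointer state, while B's range(...) raises
-- ValueError (step 0) or treats the degenerate range as empty.
def Pre_is_present_in_each_segment (array : List Int) (element : Int) (segment_size : Int) : Prop := 1 ≤ segment_size
instance (array : List Int) (element : Int) (segment_size : Int) : Decidable (Pre_is_present_in_each_segment array element segment_size) := by unfold Pre_is_present_in_each_segment; infer_instance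

def pvWitness_is_present_in_each_segment : List Int × Int × Int := ([1, 2, 1, 2], 1, 2)

def Spec_is_present_in_each_segment (array : List Int) (element : Int) (segment_size : Int) (out : Bool) : Prop := out = is_present_in_each_segment_alt array element segment_size
instance (array : List Int) (element : Int) (segment_size : Int) (out : Bool) : Decidable (Spec_is_present_in_each_segment array element segment_size out) := by unfold Spec_is_present_in_each_segment; infer_instance

-- ===== CLAIM (what is proved, stated in full; the proofs are below) =====
def Claim_equal_is_present_in_each_segment : Prop := ∀ (array : List Int) (element : Int) (segment_size : Int), Dom_is_present_in_each_segment array element segment_size → Pre_is_present_in_each_segment array element segment_size → Spec_is_present_in_each_segment array element segment_size (is_present_in_each_segment array element segment_size)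

-- ===== LEMMAS AND PROOFS =====

-- Reference recursion: "every segment starting at s, s+ss, … contains element", with fuel.
def pvSegAll (array : List Int) (element : Int) (ss : Int) : Nat → Int → Bool
  | 0, _ => true
  | fuel+1, s =>
    if s < (array.length : Int) then
      decide (element ∈ PySem.List.slice array (some s) (some (s + ss))) &&
        pvSegAll array element ss fuel (s + ss)
    else true

theorem pvSegAll_ge_len (array : List Int) (element ss : Int) (fuel : Nat) (s : Int)
    (h : (array.length : Int) ≤ s) : pvSegAll array element ss fuel s = true := by
  cases fuel with
  | zero => rfl
  | succ f => simp [pvSegAll, not_lt.mpr h]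

theorem pvSegAll_congr (array : List Int) (element ss : Int) (hss : 1 ≤ ss) :
    ∀ (f1 f2 : Nat) (s : Int), ((array.length : Int) - s).toNat ≤ f1 →
      ((array.length : Int) - s).toNat ≤ f2 →
      pvSegAll array element ss f1 s = pvSegAll array element ss f2 s := by
  intro f1
  induction f1 with
  | zero =>
    intro f2 s h1 h2
    have hs : (array.length : Int) ≤ s := by omega
    rw [pvSegAll_ge_len array element ss 0 s hs, pvSegAll_ge_len array element ss f2 s hs]
  | succ f1' ih =>
    intro f2 s h1 h2
    by_cases hs : s < (array.length : Int)
    · obtain ⟨f2', rfl⟩ : ∃ k, f2 = k + 1 := by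
        refine ⟨f2 - 1, ?_⟩; omega
      simp only [pvSegAll, if_pos hs]
      rw [ih f2' (s + ss) (by omega) (by omega)]
    · rw [pvSegAll_ge_len array element ss _ s (by omega),
        pvSegAll_ge_len array element ss f2 s (by omega)]

-- range(a, b, s) with 0 < s and a < b starts with a.
theorem pvPyRange_pos_cons (a b s : Int) (hs : 0 < s) (hab : a < b) :
    PySem.List.pyRange a b s = a :: PySem.List.pyRange (a + s) b s := by
  rw [PySem.List.pyRange_of_pos _ _ hs, PySem.List.pyRange_of_pos _ _ hs]
  by_cases h2 : a + s < b
  · have hdiv : (b - a + s - 1) / s = (b - (a + s) + s - 1) / s + 1 := by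
      have : b - a + s - 1 = (b - (a + s) + s - 1) + 1 * s := by ring
      rw [this, Int.add_mul_ediv_right _ _ (by omega : s ≠ 0)]
    have hnn : 0 ≤ (b - (a + s) + s - 1) / s := Int.ediv_nonneg (by omega) (by omega)
    rw [if_pos hab, if_pos h2, hdiv]
    have : ((b - (a + s) + s - 1) / s + 1).toNat = ((b - (a + s) + s - 1) / s).toNat + 1 := by omega
    rw [this, List.range_succ_eq_map]
    simp only [List.map_cons, List.map_map]
    congr 1
    · push_cast; ring
    · congr 1
      funext k
      simp only [Function.comp_apply]
      push_cast
      ring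
  · have h1 : 1 ≤ (b - a + s - 1) / s := by
      rw [Int.le_ediv_iff_mul_le hs]; omega
    have hlt : (b - a + s - 1) / s < 2 := by
      rw [Int.ediv_lt_iff_lt_mul hs]; omega
    have : ((b - a + s - 1) / s).toNat = 1 := by omega
    rw [if_pos hab, if_neg h2, this]
    simp

theorem pvPyRange_empty_of_ge (a b s : Int) (hs : 0 < s) (hab : b ≤ a) :
    PySem.List.pyRange a b s = [] := by
  rw [PySem.List.pyRange_of_pos _ _ hs, if_neg (by omega)]
  simp

-- B's all-over-range equals the reference recursion.
theorem pvAlt_eq_segAll (array : List Int) (element ss : Int) (hss : 1 ≤ ss) :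
    ∀ (fuel : Nat) (s : Int), 0 ≤ s → ((array.length : Int) - s).toNat ≤ fuel →
      (PySem.List.pyRange s (array.length : Int) ss).all
        (fun start => decide (element ∈ PySem.List.slice array (some start) (some (start + ss)))) =
      pvSegAll array element ss fuel s := by
  intro fuel
  induction fuel with
  | zero =>
    intro s h0 hf
    rw [pvPyRange_empty_of_ge _ _ _ (by omega) (by omega)]
    rw [pvSegAll_ge_len array element ss 0 s (by omega)]
    rfl
  | succ f ih =>
    intro s h0 hf
    by_cases hs : s < (array.length : Int)
    · rw [pvPyRange_pos_cons _ _ _ (by omega) hs]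
      simp only [List.all_cons]
      rw [ih (s + ss) (by omega) (by omega)]
      simp [pvSegAll, if_pos hs]
    · rw [pvPyRange_empty_of_ge _ _ _ (by omega) (by omega),
        pvSegAll_ge_len array element ss _ s (by omega)]
      rfl

-- slice with both bounds past the end is insensitive to the upper bound.
theorem pvSlice_ge_len (array : List Int) (a b b' : Int) (ha : 0 ≤ a)
    (hb : (array.length : Int) ≤ b) (hb' : (array.length : Int) ≤ b') :
    PySem.List.slice array (some a) (some b) = PySem.List.slice array (some a) (some b') := by
  rw [PySem.List.slice_toNat array ha (by omega), PySem.List.slice_toNat array ha (by omega)]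
  rw [List.take_of_length_le (by simp [List.length_drop]; omega),
    List.take_of_length_le (by simp [List.length_drop]; omega)]

theorem pvSlice_cons (array : List Int) (i b : Int) (h0 : 0 ≤ i)
    (hlt : i < (array.length : Int)) (hb : i < b) :
    PySem.List.slice array (some i) (some b)
      = array[i.toNat]'(by omega) :: PySem.List.slice array (some (i + 1)) (some b) := by
  rw [PySem.List.slice_toNat array h0 (by omega), PySem.List.slice_toNat array (by omega) (by omega)]
  rw [List.drop_eq_getElem_cons (by omega : i.toNat < array.length)]
  have h1 : (i + 1).toNat = i.toNat + 1 := by omega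
  have h2 : b.toNat - i.toNat = (b.toNat - (i + 1).toNat) + 1 := by omega
  rw [h2, List.take_succ_cons, h1]

theorem pvSlice_empty_of_ge (array : List Int) (a b : Int) (ha : (array.length : Int) ≤ a)
    (hb : 0 ≤ b) :
    PySem.List.slice array (some a) (some b) = [] := by
  rw [PySem.List.slice_toNat array (by omega) hb]
  rw [List.drop_eq_nil_of_le (by omega)]
  simp

theorem pvLoopA_exit (array : List Int) (element ss : Int) (fuel : Nat) (i j : Int) (isp : Bool)
    (h : (array.length : Int) ≤ i) : pvLoopA array element ss fuel i j isp = isp := by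
  cases fuel with
  | zero => rfl
  | succ f => simp [pvLoopA, not_lt.mpr h]

-- Main invariant lemma: within a segment [s, j] the loop computes
-- "element occurs in array[i : j+1]" and then proceeds segment-wise.
theorem pvLoopA_segs (array : List Int) (element ss : Int) (hss : 1 ≤ ss) :
    ∀ (fuel : Nat) (s i j : Int) (isp : Bool), 0 ≤ s → s ≤ i → i ≤ j →
      (j = s + ss - 1 ∨ (j = (array.length : Int) - 1 ∧ (array.length : Int) ≤ s + ss)) →
      ((array.length : Int) ≤ j → isp = false) →
      ((array.length : Int) - i).toNat < fuel →
      pvLoopA array element ss fuel i j isp =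
        (decide (element ∈ PySem.List.slice array (some i) (some (j + 1))) &&
          pvSegAll array element ss (((array.length : Int) - (j + 1)).toNat) (j + 1)) := by
  intro fuel
  induction fuel with
  | zero => intro s i j isp _ _ _ _ _ hf; omega
  | succ f ih =>
    intro s i j isp h0s hsi hij hj hisp hf
    by_cases hi : i < (array.length : Int)
    · -- loop body runs; 0 ≤ i < len so indexing succeeds
      have hget : PySem.List.pyGet? array i = some (array[i.toNat]'(by omega)) :=
        PySem.List.pyGet?_eq_some_getElem array (by omega) (by omega)
      simp only [pvLoopA, if_pos hi, hget]
      by_cases hv : array[i.toNat]'(by omega) = element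
      · -- found: membership on the RHS holds via the head of the slice
        have hmem : element ∈ PySem.List.slice array (some i) (some (j + 1)) := by
          rw [pvSlice_cons array i (j + 1) (by omega) hi (by omega)]
          exact hv ▸ List.mem_cons_self
        rw [if_pos hv]
        simp only [hmem, decide_true, Bool.true_and]
        set j' := if j + ss < (array.length : Int) - 1 then j + ss else (array.length : Int) - 1 with hj'def
        by_cases hnext : j + 1 < (array.length : Int)
        · -- next segment exists
          have hj'lt : j' < (array.length : Int) := by
            rw [hj'def]; split <;> omega
          have hj'ge : j + 1 ≤ j' := by
            rw [hj'def]; split <;> omega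
          have hj'inv : j' = (j + 1) + ss - 1 ∨
              (j' = (array.length : Int) - 1 ∧ (array.length : Int) ≤ (j + 1) + ss) := by
            rw [hj'def]; split
            · left; ring
            · right; omega
          rw [ih (j + 1) (j + 1) j' true (by omega) le_rfl hj'ge hj'inv (by omega) (by omega)]
          -- unfold RHS pvSegAll once at s' = j+1 < len
          obtain ⟨n, hn⟩ : ∃ n, (((array.length : Int) - (j + 1)).toNat) = n + 1 := by
            refine ⟨((array.length : Int) - (j + 1)).toNat - 1, by omega⟩
          rw [hn]
          simp only [pvSegAll, if_pos hnext]
          rcases hj'inv with hcase | ⟨hcase, hge⟩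
          · have hb : j' + 1 = (j + 1) + ss := by omega
            rw [hb]
            congr 1
            exact pvSegAll_congr array element ss hss _ _ _ (by omega) (by omega)
          · have hb : j' + 1 = (array.length : Int) := by omega
            rw [hb]
            rw [pvSlice_ge_len array (j + 1) (array.length : Int) ((j + 1) + ss) (by omega) le_rfl (by omega)]
            rw [pvSegAll_ge_len array element ss _ _ le_rfl,
              pvSegAll_ge_len array element ss _ _ (by omega)]
        · -- the found element closed the final segment: loop exits with True
          rw [pvLoopA_exit array element ss f (j + 1) j' true (by omega)]
          rw [pvSegAll_ge_len array element ss _ _ (by omega)]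
      · rw [if_neg hv]
        by_cases hlt : i < j
        · -- advance within the segment: array[i] ≠ element drops off the slice
          rw [if_pos hlt, ih s (i + 1) j isp h0s (by omega) (by omega) hj hisp (by omega)]
          have hiff : (element ∈ PySem.List.slice array (some (i + 1)) (some (j + 1))) ↔
              (element ∈ PySem.List.slice array (some i) (some (j + 1))) := by
            rw [pvSlice_cons array i (j + 1) (by omega) hi (by omega)]
            simp only [List.mem_cons]
            exact ⟨Or.inr, fun h => Or.resolve_left h (fun h' => hv (Eq.symm h'))⟩
          rw [decide_eq_decide.mpr hiff]
        · -- i = j and the last cell of the segment misses: both sides are False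
          rw [if_neg hlt]
          have hieq : PySem.List.slice array (some i) (some (j + 1)) = [array[i.toNat]'(by omega)] := by
            rw [pvSlice_cons array i (j + 1) (by omega) hi (by omega),
              PySem.List.slice_toNat array (by omega) (by omega)]
            have hz : (j + 1).toNat - (i + 1).toNat = 0 := by omega
            simp [hz]
          rw [hieq]
          have hne : element ≠ array[i.toNat]'(by omega) := fun h => hv (Eq.symm h)
          simp [hne]
    · -- i already past the end: only reachable with isp = false (oversized first segment)
      have hjlen : (array.length : Int) ≤ j := by omega
      rw [pvLoopA_exit array element ss _ i j isp (by omega), hisp hjlen]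
      rw [pvSlice_empty_of_ge array i (j + 1) (by omega) (by omega)]
      simp

-- ===== VERDICT (by name: the statement is the Claim_ definition above) =====
theorem is_present_in_each_segment_spec : Claim_equal_is_present_in_each_segment := by
  intro array element ss _ hpre
  unfold Spec_is_present_in_each_segment
  have hss : 1 ≤ ss := hpre
  by_cases hnil : array = []
  · subst hnil
    simp [is_present_in_each_segment, is_present_in_each_segment_alt, pvLoopA]
  · have hlen : 0 < (array.length : Int) := by
      have := List.length_pos_of_ne_nil hnil; omega
    unfold is_present_in_each_segment is_present_in_each_segment_alt
    rw [if_neg hnil]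
    rw [pvAlt_eq_segAll array element ss hss (array.length) 0 le_rfl (by omega)]
    rw [pvLoopA_segs array element ss hss (array.length + 1) 0 0 (ss - 1) false
      le_rfl le_rfl (by omega) (Or.inl (by ring)) (fun _ => rfl) (by omega)]
    obtain ⟨n, hn⟩ : ∃ n, array.length = n + 1 := by
      refine ⟨array.length - 1, by omega⟩
    rw [hn]
    simp only [pvSegAll, if_pos (by omega : (0 : Int) < (array.length : Int))]
    have h01 : (0 : Int) + ss = ss := by ring
    have h11 : ss - 1 + 1 = ss := by ring
    rw [h01, h11]
    congr 1
    exact pvSegAll_congr array element ss hss _ _ _ (by omega) (by omega)
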